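-- pv_equiv track=rewrite | github.com/shunty-gh/AdventOfCode2022 | py/day18.py | get_exposed
-- ===== SOURCE A (Python) =====
-- def get_exposed(cubes: set[tuple[int,int,int]]) -> int:
--     result = 0
--     for (cx,cy,cz) in cubes:
--         exposed = 6
--         for (dx,dy,dz) in [(-1,0,0),(1,0,0),(0,-1,0),(0,1,0),(0,0,-1),(0,0,1)]:
--             if (cx+dx,cy+dy,cz+dz) in cubes:
--                 exposed -= 1
--         result += exposed
--     return result
-- ===== SOURCE B (Python) =====
-- def get_exposed(cubes):
--     # Count faces with doubled coordinates: a face shared by two adjacent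
--     # cubes gets the same key twice; faces seen exactly once are exposed.
--     faces = {}
--     for (x, y, z) in cubes:
--         for f in ((2*x-1, 2*y, 2*z), (2*x+1, 2*y, 2*z),
--                   (2*x, 2*y-1, 2*z), (2*x, 2*y+1, 2*z),
--                   (2*x, 2*y, 2*z-1), (2*x, 2*y, 2*z+1)):
--             faces[f] = faces.get(f, 0) + 1
--     return sum(1 for n in faces.values() if n == 1)
-- ===== Notes on version B (the rewrite author's own statement) =====
-- stated objective: idiomatic
-- what changed: Replaces the per-cube six-direction membership scan with a single pass that tallies doubled-coordinate face keys in a dict and counts the keys seen exactly once.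
import Mathlib
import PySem

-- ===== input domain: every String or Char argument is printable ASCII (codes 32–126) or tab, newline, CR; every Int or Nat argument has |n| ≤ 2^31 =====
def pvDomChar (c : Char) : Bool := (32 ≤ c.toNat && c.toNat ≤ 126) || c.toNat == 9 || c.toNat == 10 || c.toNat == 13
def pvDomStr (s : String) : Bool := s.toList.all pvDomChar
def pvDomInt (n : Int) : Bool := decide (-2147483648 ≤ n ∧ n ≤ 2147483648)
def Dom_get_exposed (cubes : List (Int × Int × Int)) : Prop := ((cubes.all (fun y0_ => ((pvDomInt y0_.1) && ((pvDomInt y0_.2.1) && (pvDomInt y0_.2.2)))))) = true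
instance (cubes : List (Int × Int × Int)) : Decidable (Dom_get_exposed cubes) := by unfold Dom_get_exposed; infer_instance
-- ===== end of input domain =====

-- B replaces A's per-cube six-direction membership scan by tallying doubled-coordinate
-- face keys in a dict and counting the keys seen exactly once (idiomatic face-counting).


-- ===== PORT A =====
-- the six neighbour directions, exactly A's literal list
def pvDirs : List (Int × Int × Int) :=
  [(-1, 0, 0), (1, 0, 0), (0, -1, 0), (0, 1, 0), (0, 0, -1), (0, 0, 1)]

def get_exposed (cubes : List (Int × Int × Int)) : Int :=
  cubes.foldl (fun result c =>
    let exposed : Int := pvDirs.foldl (fun exposed d =>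
      if cubes.contains (c.1 + d.1, c.2.1 + d.2.1, c.2.2 + d.2.2) then exposed - 1 else exposed) 6
    result + exposed) 0

-- ===== PORT B =====
-- the six doubled-coordinate face keys of a cube, exactly Source B's literal tuple
def pvFaces (c : Int × Int × Int) : List (Int × Int × Int) :=
  [(2 * c.1 - 1, 2 * c.2.1, 2 * c.2.2), (2 * c.1 + 1, 2 * c.2.1, 2 * c.2.2),
   (2 * c.1, 2 * c.2.1 - 1, 2 * c.2.2), (2 * c.1, 2 * c.2.1 + 1, 2 * c.2.2),
   (2 * c.1, 2 * c.2.1, 2 * c.2.2 - 1), (2 * c.1, 2 * c.2.1, 2 * c.2.2 + 1)]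

def get_exposed_alt (cubes : List (Int × Int × Int)) : Int :=
  let faces : PySem.Dict (Int × Int × Int) Int :=
    cubes.foldl (fun d c =>
      (pvFaces c).foldl (fun d f => d.insert f (d.getD f 0 + 1)) d) PySem.Dict.empty
  ((faces.values.filter (fun n => n == 1)).length : Int)

-- ===== PRECONDITION & SPEC =====
-- A's parameter is declared a set; Pre_ excludes lists with duplicate cubes, which do not
-- represent a set — there A counts each copy separately while B's face counts double.
def Pre_get_exposed (cubes : List (Int × Int × Int)) : Prop := cubes.Nodup
instance (cubes : List (Int × Int × Int)) : Decidable (Pre_get_exposed cubes) := by unfold Pre_get_exposed; infer_instance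
def pvWitness_get_exposed : (List (Int × Int × Int)) := [(0, 0, 0), (1, 0, 0)]
def Spec_get_exposed (cubes : List (Int × Int × Int)) (out : Int) : Prop := out = get_exposed_alt cubes
instance (cubes : List (Int × Int × Int)) (out : Int) : Decidable (Spec_get_exposed cubes out) := by unfold Spec_get_exposed; infer_instance

-- ===== CLAIM (what is proved, stated in full; the proofs are below) =====
def Claim_equal_get_exposed : Prop := ∀ (cubes : List (Int × Int × Int)), Dom_get_exposed cubes → Pre_get_exposed cubes → Spec_get_exposed cubes (get_exposed cubes)

-- ===== LEMMAS AND PROOFS =====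

-- the face key of cube c in direction d (doubled coordinates)
def pvKey (c d : Int × Int × Int) : Int × Int × Int :=
  (2 * c.1 + d.1, 2 * c.2.1 + d.2.1, 2 * c.2.2 + d.2.2)

-- c's neighbour in direction d
def pvNbr (c d : Int × Int × Int) : Int × Int × Int :=
  (c.1 + d.1, c.2.1 + d.2.1, c.2.2 + d.2.2)

theorem pvFaces_eq_map (c : Int × Int × Int) : pvFaces c = pvDirs.map (pvKey c) := by
  simp [pvFaces, pvDirs, pvKey, Prod.ext_iff]
  omega

-- a dict with Nodup keys is its keys list paired with its lookups
theorem pv_items_aux {κ ν : Type} [BEq κ] [LawfulBEq κ] (d0 : ν) : ∀ (l : List (κ × ν)),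
    (l.map Prod.fst).Nodup →
    l.map (fun p => (p.1, (PySem.Dict.mk l).getD p.1 d0)) = l := by
  intro l
  induction l with
  | nil => simp
  | cons p t ih =>
    intro h
    obtain ⟨k, v⟩ := p
    simp only [List.map_cons, List.nodup_cons, List.mem_map] at h
    obtain ⟨hp, ht⟩ := h
    simp only [List.map_cons, List.cons.injEq]
    refine ⟨?_, ?_⟩
    · simp [PySem.Dict.getD, PySem.Dict.get?_mk_cons]
    · have hstep : List.map (fun q => (q.1, (PySem.Dict.mk ((k, v) :: t)).getD q.1 d0)) t
          = List.map (fun q => (q.1, (PySem.Dict.mk t).getD q.1 d0)) t := by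
        apply List.map_congr_left
        intro q hq
        have hne : (k == q.1) = false := by
          simp only [beq_eq_false_iff_ne, ne_eq]
          intro hEq
          exact hp ⟨q, hq, hEq.symm⟩
        simp [PySem.Dict.getD, PySem.Dict.get?_mk_cons, hne]
      rw [hstep, ih ht]

theorem pv_items_eq {κ ν : Type} [BEq κ] [LawfulBEq κ] (d : PySem.Dict κ ν) (d0 : ν)
    (h : d.keys.Nodup) : d.items = d.keys.map (fun k => (k, d.getD k d0)) := by
  obtain ⟨l⟩ := d
  have hk : (PySem.Dict.mk l).keys = l.map Prod.fst := by simp [PySem.Dict.keys]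
  rw [hk] at h ⊢
  rw [List.map_map]
  exact (pv_items_aux d0 l h).symm

-- the inner fold of A counts down from 6 by the hit directions
theorem pv_foldl_sub {β : Type} (q : β → Bool) : ∀ (l : List β) (z : Int),
    l.foldl (fun e d => if q d then e - 1 else e) z = z - ((l.filter q).length : Int) := by
  intro l
  induction l with
  | nil => simp
  | cons x t ih =>
    intro z
    by_cases hx : q x <;> simp [hx, ih] <;> omega

theorem pv_sum_two_counts {α : Type} [BEq α] [LawfulBEq α] [DecidableEq α] (a b : α) : ∀ (l : List α),
    (l.map (fun x => (if x = a then 1 else 0) + (if x = b then 1 else 0))).sum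
      = l.count a + l.count b := by
  intro l
  induction l with
  | nil => simp
  | cons x t ih =>
    simp only [List.map_cons, List.sum_cons, List.count_cons, ih]
    by_cases h1 : x = a <;> by_cases h2 : x = b <;> simp [h1, h2] <;> omega

-- count of a face key inside the faces of one cube: the doubled coordinates make the
-- key of (c, d) collide only with cube c itself and with c's neighbour in direction d
set_option maxHeartbeats 1000000 in
theorem pv_count_faces (c' c d : Int × Int × Int) (hd : d ∈ pvDirs) :
    (pvFaces c').count (pvKey c d)
      = (if c' = c then 1 else 0) + (if c' = pvNbr c d then 1 else 0) := by
  obtain ⟨x', y', z'⟩ := c'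
  obtain ⟨x, y, z⟩ := c
  simp only [pvDirs, List.mem_cons, List.not_mem_nil, or_false] at hd
  rcases hd with h|h|h|h|h|h <;> subst h <;>
    · simp [pvFaces, pvKey, pvNbr, List.count_cons, Prod.ext_iff]
      split_ifs <;> omega

-- total count of a face key over all cubes
theorem pv_count_L (cubes : List (Int × Int × Int)) (hnd : cubes.Nodup)
    (c d : Int × Int × Int) (hc : c ∈ cubes) (hd : d ∈ pvDirs) :
    (cubes.flatMap pvFaces).count (pvKey c d)
      = 1 + (if pvNbr c d ∈ cubes then 1 else 0) := by
  rw [List.count_flatMap]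
  have hmap : (List.map (List.count (pvKey c d) ∘ pvFaces) cubes).sum
      = (cubes.map (fun x => (if x = c then 1 else 0) + (if x = pvNbr c d then 1 else 0))).sum := by
    apply congrArg
    apply List.map_congr_left
    intro a _
    exact pv_count_faces a c d hd
  rw [hmap, pv_sum_two_counts, List.count_eq_one_of_mem hnd hc]
  by_cases h : pvNbr c d ∈ cubes
  · simp [h, List.count_eq_one_of_mem hnd h]
  · simp [h, List.count_eq_zero_of_not_mem h]

-- length of filter of the negation
theorem pv_length_filter_not {α : Type} (q : α → Bool) : ∀ (l : List α),
    (l.filter (fun x => !q x)).length = l.length - (l.filter q).length := by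
  intro l
  induction l with
  | nil => simp
  | cons x t ih =>
    have := List.length_filter_le q t
    by_cases hx : q x <;> simp [hx, ih] <;> omega

-- distinct count-1 keys are as many as count-1 positions
theorem pv_dedup_filter_len {α : Type} [BEq α] [LawfulBEq α] [DecidableEq α] (L : List α) :
    ((PySem.Set.ofList L).filter (fun k => L.count k == 1)).length
      = (L.filter (fun k => L.count k == 1)).length := by
  have h1 : ((PySem.Set.ofList L).filter (fun k => L.count k == 1)).Nodup :=
    (PySem.Set.nodup_ofList L).filter _
  have h2 : (L.filter (fun k => L.count k == 1)).Nodup := by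
    rw [List.nodup_iff_count_le_one]
    intro a
    by_cases hp : (L.count a == 1) = true
    · have := List.count_filter (p := fun k => L.count k == 1) (a := a) (l := L) hp
      rw [this]
      exact Nat.le_of_eq (by simpa using hp)
    · have : a ∉ L.filter (fun k => L.count k == 1) := by
        simp only [List.mem_filter]
        rintro ⟨-, hq⟩; exact hp hq
      simp [List.count_eq_zero_of_not_mem this]
  rw [← List.toFinset_card_of_nodup h1, ← List.toFinset_card_of_nodup h2]
  congr 1
  ext a
  simp [PySem.Set.mem_ofList]

-- B's value as a filtered length over the flattened face list
theorem pv_alt_eq (cubes : List (Int × Int × Int)) :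
    get_exposed_alt cubes
      = (((cubes.flatMap pvFaces).filter
          (fun k => (cubes.flatMap pvFaces).count k == 1)).length : Int) := by
  unfold get_exposed_alt
  rw [← List.foldl_flatMap, PySem.Dict.foldl_insert_getD_add_one_eq_counter]
  have hkeys : (PySem.Dict.counter (cubes.flatMap pvFaces)).keys
      = PySem.Set.ofList (cubes.flatMap pvFaces) := by
    rw [PySem.Dict.counter_eq_foldl, PySem.Dict.keys_foldl_modify]
    rfl
  have hnd : (PySem.Dict.counter (cubes.flatMap pvFaces)).keys.Nodup := by
    rw [hkeys]; exact PySem.Set.nodup_ofList _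
  simp only [PySem.Dict.values]
  rw [pv_items_eq _ 0 hnd, hkeys, List.map_map]
  have hval : (PySem.Set.ofList (cubes.flatMap pvFaces)).map
        ((fun p => p.2) ∘ fun k => (k, (PySem.Dict.counter (cubes.flatMap pvFaces)).getD k 0))
      = (PySem.Set.ofList (cubes.flatMap pvFaces)).map
        (fun k => (((cubes.flatMap pvFaces).count k : Int))) := by
    apply List.map_congr_left
    intro k _
    simp [PySem.Dict.getD_counter]
  rw [hval, List.filter_map, List.length_map]
  have hpred : (PySem.Set.ofList (cubes.flatMap pvFaces)).filter
        ((fun n => n == 1) ∘ fun k => (((cubes.flatMap pvFaces).count k : Int)))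
      = (PySem.Set.ofList (cubes.flatMap pvFaces)).filter
        (fun k => (cubes.flatMap pvFaces).count k == 1) := by
    apply List.filter_congr
    intro k _
    simp only [Function.comp_apply]
    rcases eq_or_ne ((cubes.flatMap pvFaces).count k) 1 with h | h
    · simp [h]
    · have h' : (((cubes.flatMap pvFaces).count k : Int)) ≠ 1 := by omega
      simp [h, h']
  rw [hpred, pv_dedup_filter_len]

-- ===== VERDICT (by name: the statement is the Claim_ definition above) =====
theorem get_exposed_spec : Claim_equal_get_exposed := by
  unfold Claim_equal_get_exposed
  intro cubes _ hnd
  unfold Spec_get_exposed Pre_get_exposed at *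
  -- A as a sum over cubes
  have hA : get_exposed cubes
      = (cubes.map (fun c =>
          (6 : Int) - ((pvDirs.filter (fun d => cubes.contains (pvNbr c d))).length : Int))).sum := by
    show List.foldl (fun result c => result + pvDirs.foldl (fun exposed d =>
      if cubes.contains (c.1 + d.1, c.2.1 + d.2.1, c.2.2 + d.2.2) then exposed - 1 else exposed) 6)
        0 cubes = _
    rw [PySem.List.foldl_add (g := fun (c : Int × Int × Int) => pvDirs.foldl (fun exposed d =>
      if cubes.contains (c.1 + d.1, c.2.1 + d.2.1, c.2.2 + d.2.2) then exposed - 1 else exposed) 6)]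
    rw [zero_add]
    apply congrArg
    apply List.map_congr_left
    intro c _
    exact pv_foldl_sub (fun d => cubes.contains (pvNbr c d)) pvDirs 6
  -- B as the same sum
  have hB : ((cubes.flatMap pvFaces).filter
        (fun k => (cubes.flatMap pvFaces).count k == 1)).length
      = (cubes.map (fun c =>
          6 - (pvDirs.filter (fun d => cubes.contains (pvNbr c d))).length)).sum := by
    rw [List.filter_flatMap, List.length_flatMap]
    apply congrArg
    apply List.map_congr_left
    intro c hc
    rw [pvFaces_eq_map, List.filter_map, List.length_map]
    have hfc : pvDirs.filter ((fun k => (cubes.flatMap pvFaces).count k == 1) ∘ pvKey c)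
        = pvDirs.filter (fun d => !cubes.contains (pvNbr c d)) := by
      apply List.filter_congr
      intro d hd
      simp only [Function.comp_apply]
      rw [pv_count_L cubes hnd c d hc hd]
      by_cases h : pvNbr c d ∈ cubes <;> simp [h, List.contains_eq_mem]
    rw [hfc, pv_length_filter_not]
    have h6 : pvDirs.length = 6 := rfl
    rw [h6]
  rw [hA, pv_alt_eq, hB, Nat.cast_list_sum, List.map_map]
  apply congrArg
  apply List.map_congr_left
  intro c _
  have hle := List.length_filter_le (fun d => cubes.contains (pvNbr c d)) pvDirs
  have h6 : pvDirs.length = 6 := rfl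
  simp only [Function.comp_apply]
  omega
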